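-- pv_equiv track=rewrite | github.com/vadondaniel/dialogue-visual-editor | helpers/core/parser.py | _js_bracket_delta_outside_strings
-- ===== SOURCE A (Python) =====
-- def _js_bracket_delta_outside_strings(line: str) -> int:
--     delta = 0
--     in_string = False
--     string_quote = ""
--     escaping = False
--     for char in line:
--         if in_string:
--             if escaping:
--                 escaping = False
--                 continue
--             if char == "\\":
--                 escaping = True
--                 continue
--             if char == string_quote:
--                 in_string = False
--             continue
--         if char in {'"', "'"}:
--             in_string = True
--             string_quote = char
--             continue
--         if char == "[":
--             delta += 1
--             continue
--         if char == "]":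
--             delta -= 1
--     return delta
-- ===== SOURCE B (Python) =====
-- def _js_bracket_delta_outside_strings(line: str) -> int:
--     # Tokenizer: consume whole string literals with a skip helper, count brackets at top level.
--     i, n, delta = 0, len(line), 0
--     while i < n:
--         c = line[i]
--         i += 1
--         if c == '"' or c == "'":
--             i = _skip_string_literal(line, i, c)
--         elif c == "[":
--             delta += 1
--         elif c == "]":
--             delta -= 1
--     return delta
--
--
-- def _skip_string_literal(line: str, i: int, quote: str) -> int:
--     n = len(line)
--     while i < n:
--         c = line[i]
--         if c == "\\":
--             i += 2
--         elif c == quote: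
--             return i + 1
--         else:
--             i += 1
--     return n
-- ===== Notes on version B (the rewrite author's own statement) =====
-- stated objective: alternative
-- what changed: Replaces A's single per-character loop with boolean state flags (in_string, escaping) by a two-level tokenizer: a main scan that counts brackets and, on a quote, hands off to a helper that consumes the whole string literal (jumping two chars past a backslash) and returns the resume position.
import Mathlib
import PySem

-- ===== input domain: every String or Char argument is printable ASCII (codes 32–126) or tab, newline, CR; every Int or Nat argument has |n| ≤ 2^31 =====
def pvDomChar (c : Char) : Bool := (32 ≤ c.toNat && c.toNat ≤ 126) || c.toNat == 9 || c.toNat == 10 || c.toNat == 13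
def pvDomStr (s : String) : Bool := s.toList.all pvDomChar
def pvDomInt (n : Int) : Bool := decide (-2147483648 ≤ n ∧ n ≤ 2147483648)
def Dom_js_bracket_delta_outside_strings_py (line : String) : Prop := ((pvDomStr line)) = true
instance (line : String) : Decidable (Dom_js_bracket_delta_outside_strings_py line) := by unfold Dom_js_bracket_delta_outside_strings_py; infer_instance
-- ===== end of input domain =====

-- B replaces A's per-character boolean-flag automaton by a tokenizer that consumes whole
-- string literals with a skip helper and counts brackets only at top level (objective: alternative).

-- ===== PORT A =====
-- state: delta, in_string, string_quote (Python's initial "" is never compared, since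
-- string_quote is only read when in_string = true; we use a Char with dummy init '"'), escaping
def pvGoA (delta : Int) (inStr : Bool) (q : Char) (esc : Bool) : List Char → Int
  | [] => delta
  | c :: cs =>
    if inStr then
      if esc then pvGoA delta inStr q false cs
      else if c = '\\' then pvGoA delta inStr q true cs
      else if c = q then pvGoA delta false q esc cs
      else pvGoA delta inStr q esc cs
    else if c = '"' ∨ c = '\'' then pvGoA delta true c esc cs
    else if c = '[' then pvGoA (delta + 1) inStr q esc cs
    else if c = ']' then pvGoA (delta - 1) inStr q esc cs
    else pvGoA delta inStr q esc cs

def js_bracket_delta_outside_strings_py (line : String) : Int :=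
  pvGoA 0 false '"' false line.toList

-- ===== PORT B =====
-- _skip_string_literal: returns the rest of the line after the literal
def pvSkipStr (q : Char) : List Char → List Char
  | [] => []
  | c :: cs =>
    if c = '\\' then
      match cs with
      | [] => []
      | _ :: cs' => pvSkipStr q cs'
    else if c = q then cs
    else pvSkipStr q cs

theorem pvSkipStr_cons (q c : Char) (cs : List Char) :
    pvSkipStr q (c :: cs) =
      if c = '\\' then (match cs with | [] => [] | _ :: cs' => pvSkipStr q cs')
      else if c = q then cs
      else pvSkipStr q cs := by
  by_cases h1 : c = '\\'
  · cases cs <;> simp [pvSkipStr, h1]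
  · by_cases h2 : c = q <;> cases cs <;> simp [pvSkipStr, h1, h2]

theorem pvSkipStr_len_aux (q : Char) : ∀ (n : Nat) (cs : List Char), cs.length ≤ n →
    (pvSkipStr q cs).length ≤ cs.length := by
  intro n
  induction n with
  | zero =>
    intro cs h
    have : cs = [] := List.eq_nil_of_length_eq_zero (Nat.le_zero.mp h)
    subst this; simp [pvSkipStr]
  | succ n ih =>
    intro cs h
    match cs with
    | [] => simp [pvSkipStr]
    | c :: cs =>
      rw [pvSkipStr_cons]
      have hlen : cs.length ≤ n := by simpa using h
      split_ifs with h1 h2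
      · cases cs with
        | nil => simp
        | cons c' cs' =>
          have : (pvSkipStr q cs').length ≤ cs'.length := ih cs' (by simp at hlen; omega)
          simpa using Nat.le_trans this (by omega)
      · simp
      · have := ih cs hlen; simpa using Nat.le_trans this (by omega)

theorem pvSkipStr_len (q : Char) (cs : List Char) : (pvSkipStr q cs).length ≤ cs.length :=
  pvSkipStr_len_aux q cs.length cs le_rfl

def pvCountB : List Char → Int
  | [] => 0
  | c :: cs =>
    if c = '"' ∨ c = '\'' then pvCountB (pvSkipStr c cs)
    else if c = '[' then pvCountB cs + 1
    else if c = ']' then pvCountB cs - 1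
    else pvCountB cs
termination_by cs => cs.length
decreasing_by
  · exact Nat.lt_succ_of_le (pvSkipStr_len _ _)
  all_goals simp

def js_bracket_delta_outside_strings_py_alt (line : String) : Int :=
  pvCountB line.toList

-- ===== PRECONDITION & SPEC =====
def Spec_js_bracket_delta_outside_strings_py (line : String) (out : Int) : Prop := out = js_bracket_delta_outside_strings_py_alt line
instance (line : String) (out : Int) : Decidable (Spec_js_bracket_delta_outside_strings_py line out) := by unfold Spec_js_bracket_delta_outside_strings_py; infer_instance

-- ===== CLAIM (what is proved, stated in full; the proofs are below) =====
def Claim_equal_js_bracket_delta_outside_strings_py : Prop := ∀ (line : String), Dom_js_bracket_delta_outside_strings_py line → Spec_js_bracket_delta_outside_strings_py line (js_bracket_delta_outside_strings_py line)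

-- ===== LEMMAS AND PROOFS =====

theorem pvCountB_cons (c : Char) (cs : List Char) :
    pvCountB (c :: cs) =
      if c = '"' ∨ c = '\'' then pvCountB (pvSkipStr c cs)
      else if c = '[' then pvCountB cs + 1
      else if c = ']' then pvCountB cs - 1
      else pvCountB cs := by
  rw [pvCountB]

theorem pvCountB_nil : pvCountB [] = 0 := by rw [pvCountB]

-- A's accumulator shifts out: goA delta … = delta + goA 0 …
theorem pvGoA_shift (cs : List Char) : ∀ (delta : Int) (inStr : Bool) (q : Char) (esc : Bool),
    pvGoA delta inStr q esc cs = delta + pvGoA 0 inStr q esc cs := by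
  induction cs with
  | nil => intro delta inStr q esc; simp [pvGoA]
  | cons c cs ih =>
    intro delta inStr q esc
    simp only [pvGoA]
    split_ifs <;> (rw [ih]; try (conv_rhs => rw [ih]); try ring)

-- main invariant, by strong induction on length:
-- outside a string, A's run equals B's count; inside a string (esc = false), A's run
-- equals B's count of the rest after skipping the literal.
theorem pvGoA_eq (n : Nat) : ∀ (cs : List Char), cs.length ≤ n →
    (∀ (q : Char), pvGoA 0 false q false cs = pvCountB cs) ∧
    (∀ (q : Char), pvGoA 0 true q false cs = pvCountB (pvSkipStr q cs)) := by
  induction n with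
  | zero =>
    intro cs h
    have : cs = [] := List.eq_nil_of_length_eq_zero (Nat.le_zero.mp h)
    subst this
    exact ⟨fun q => by simp [pvGoA, pvCountB_nil], fun q => by simp [pvGoA, pvSkipStr, pvCountB_nil]⟩
  | succ n ih =>
    intro cs h
    match cs with
    | [] => exact ⟨fun q => by simp [pvGoA, pvCountB_nil], fun q => by simp [pvGoA, pvSkipStr, pvCountB_nil]⟩
    | c :: cs =>
      have hlen : cs.length ≤ n := by simpa using h
      constructor
      · intro q
        rw [pvCountB_cons]
        simp only [pvGoA, Bool.false_eq_true, if_false]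
        by_cases hq : c = '"' ∨ c = '\''
        · rw [if_pos hq, if_pos hq]
          exact (ih cs hlen).2 c
        · rw [if_neg hq, if_neg hq]
          split_ifs with h1 h2
          · rw [pvGoA_shift, (ih cs hlen).1 q]; ring
          · rw [pvGoA_shift, (ih cs hlen).1 q]; ring
          · exact (ih cs hlen).1 q
      · intro q
        rw [show pvGoA 0 true q false (c :: cs) =
              (if c = '\\' then pvGoA 0 true q true cs
               else if c = q then pvGoA 0 false q false cs
               else pvGoA 0 true q false cs) from rfl,
            pvSkipStr_cons]
        split_ifs with h1 h2
        · -- backslash: escaping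
          cases cs with
          | nil => simp [pvGoA, pvCountB_nil]
          | cons c' cs' =>
            rw [show pvGoA 0 true q true (c' :: cs') = pvGoA 0 true q false cs' from rfl]
            exact (ih cs' (by simp at hlen; omega)).2 q
        · exact (ih cs hlen).1 q
        · exact (ih cs hlen).2 q

-- ===== VERDICT (by name: the statement is the Claim_ definition above) =====
theorem js_bracket_delta_outside_strings_py_spec : Claim_equal_js_bracket_delta_outside_strings_py := by
  intro line _
  unfold Spec_js_bracket_delta_outside_strings_py js_bracket_delta_outside_strings_py
    js_bracket_delta_outside_strings_py_alt
  exact (pvGoA_eq line.toList.length line.toList le_rfl).1 '"'
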